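-- pv_equiv track=rewrite | github.com/Lexsi-Labs/aligntune | src/aligntune/utils/math_grading.py | fix_sqrt
-- ===== SOURCE A (Python) =====
-- def fix_sqrt(string: str) -> str:
--     """Fix \\sqrt without braces: \\sqrt3 -> \\sqrt{3}"""
--     if "\\sqrt" not in string:
--         return string
--     splits = string.split("\\sqrt")
--     new_string = splits[0]
--     for split in splits[1:]:
--         if len(split) == 0:
--             new_string += "\\sqrt"
--             continue
--         if split[0] != "{":
--             a = split[0]
--             new_substr = "\\sqrt{" + a + "}" + split[1:]
--         else:
--             new_substr = "\\sqrt" + split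
--         new_string += new_substr
--     return new_string
-- ===== SOURCE B (Python) =====
-- def fix_sqrt(string: str) -> str:
--     """Fix \\sqrt without braces: \\sqrt3 -> \\sqrt{3} (single left-to-right scan)."""
--     out = []
--     i = 0
--     n = len(string)
--     while i < n:
--         if string.startswith("\\sqrt", i):
--             out.append("\\sqrt")
--             i += 5
--             if i < n and string[i] != "{" and not string.startswith("\\sqrt", i):
--                 out.append("{" + string[i] + "}")
--                 i += 1
--         else:
--             out.append(string[i])
--             i += 1
--     return "".join(out)
-- ===== Notes on version B (the rewrite author's own statement) =====
-- stated objective: simpler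
-- what changed: A splits the string on "\sqrt" and rebuilds it chunk by chunk; B makes a single left-to-right scan, copying characters and brace-wrapping the character after each \sqrt unless it is '{', absent, or the start of another \sqrt.
import Mathlib
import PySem

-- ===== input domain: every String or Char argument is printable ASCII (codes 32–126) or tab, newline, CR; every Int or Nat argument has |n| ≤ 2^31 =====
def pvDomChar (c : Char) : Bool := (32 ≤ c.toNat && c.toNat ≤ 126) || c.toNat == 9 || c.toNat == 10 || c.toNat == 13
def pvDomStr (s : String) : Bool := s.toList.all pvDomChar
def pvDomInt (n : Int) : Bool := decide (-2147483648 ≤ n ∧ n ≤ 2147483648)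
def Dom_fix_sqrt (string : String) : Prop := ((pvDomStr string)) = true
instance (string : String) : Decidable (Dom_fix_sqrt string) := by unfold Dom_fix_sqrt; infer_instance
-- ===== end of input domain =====

-- B replaces A's split-on-"\sqrt"-and-rebuild with a single left-to-right scan of the string (simpler, one pass, no intermediate list of chunks).


-- ===== PORT A =====
-- "\sqrt" as a character list (used by both ports)
def sqrtCs : List Char := ['\\', 's', 'q', 'r', 't']

-- A's loop body: one `split` chunk appended to `new_string`
def fixA_step (new_string : List Char) (split : List Char) : List Char :=
  match split with
  | [] => new_string ++ sqrtCs                                -- len(split) == 0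
  | a :: tl =>
    if a ≠ '{' then new_string ++ (sqrtCs ++ '{' :: a :: '}' :: tl)   -- "\sqrt{" + a + "}" + split[1:]
    else new_string ++ (sqrtCs ++ a :: tl)                    -- "\sqrt" + split

def fix_sqrt (string : String) : String :=
  if PySem.Str.isIn "\\sqrt" string = false then string
  else
    let splits := PySem.Chars.splitOn string.toList sqrtCs
    -- splits[0]: str.split never returns an empty list, so headD is exact
    String.ofList ((splits.drop 1).foldl fixA_step (splits.headD []))

-- ===== PORT B =====
-- B: single scan; at each "\sqrt" wrap the next char in braces unless it is '{',
-- absent, or the start of another "\sqrt"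
def scanB : List Char → List Char
  | [] => []
  | c :: rest =>
    if sqrtCs.isPrefixOf (c :: rest) then
      match h : rest.drop 4 with
      | [] => sqrtCs
      | d :: r' =>
        if d = '{' ∨ sqrtCs.isPrefixOf (d :: r') then sqrtCs ++ scanB (d :: r')
        else sqrtCs ++ '{' :: d :: '}' :: scanB r'
    else c :: scanB rest
termination_by l => l.length
decreasing_by
  · have := congrArg List.length h; simp [List.length_drop] at this; simp; omega
  · have := congrArg List.length h; simp [List.length_drop] at this; simp; omega
  · simp

def fix_sqrt_alt (string : String) : String := String.ofList (scanB string.toList)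

-- ===== PRECONDITION & SPEC =====
def Spec_fix_sqrt (string : String) (out : String) : Prop := out = fix_sqrt_alt string
instance (string : String) (out : String) : Decidable (Spec_fix_sqrt string out) := by unfold Spec_fix_sqrt; infer_instance

-- ===== CLAIM (what is proved, stated in full; the proofs are below) =====
def Claim_equal_fix_sqrt : Prop := ∀ (string : String), Dom_fix_sqrt string → Spec_fix_sqrt string (fix_sqrt string)

-- ===== LEMMAS AND PROOFS =====

-- a clean accumulator-form of Python's str.split on "\\sqrt" (proof helper)
def mySplitC : List Char → List Char → List (List Char)
  | [], cur => [cur.reverse]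
  | c :: rest, cur =>
    if sqrtCs.isPrefixOf (c :: rest) then
      cur.reverse :: mySplitC ((c :: rest).drop sqrtCs.length) []
    else mySplitC rest (c :: cur)
termination_by l _ => l.length
decreasing_by
  · simp [sqrtCs]
  · simp

-- what A appends for one chunk (fixA_step without the accumulator)
def pieceA (split : List Char) : List Char :=
  match split with
  | [] => sqrtCs
  | a :: tl => if a ≠ '{' then sqrtCs ++ '{' :: a :: '}' :: tl else sqrtCs ++ a :: tl

lemma fixA_step_eq (acc split : List Char) : fixA_step acc split = acc ++ pieceA split := by
  cases split with
  | nil => rfl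
  | cons a tl => simp [fixA_step, pieceA]; split_ifs <;> simp

lemma go_eq (fuel : Nat) : ∀ (l cur : List Char) (acc : List (List Char)), l.length < fuel →
    PySem.Chars.splitOn.go sqrtCs fuel l cur acc = acc.reverse ++ mySplitC l cur := by
  induction fuel with
  | zero => intro l cur acc h; omega
  | succ fuel ih =>
    intro l cur acc h
    cases l with
    | nil => simp [PySem.Chars.splitOn.go, mySplitC]
    | cons c rest =>
      by_cases hp : sqrtCs.isPrefixOf (c :: rest)
      · rw [show PySem.Chars.splitOn.go sqrtCs (fuel+1) (c :: rest) cur acc =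
            PySem.Chars.splitOn.go sqrtCs fuel (List.drop sqrtCs.length (c :: rest)) [] (cur.reverse :: acc) by
              simp [PySem.Chars.splitOn.go, hp]]
        rw [ih _ _ _ (by simp [sqrtCs] at h ⊢; omega)]
        rw [show mySplitC (c :: rest) cur = cur.reverse :: mySplitC ((c :: rest).drop sqrtCs.length) [] by
              rw [mySplitC]; simp [hp]]
        simp
      · rw [show PySem.Chars.splitOn.go sqrtCs (fuel+1) (c :: rest) cur acc =
            PySem.Chars.splitOn.go sqrtCs fuel rest (c :: cur) acc by simp [PySem.Chars.splitOn.go, hp]]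
        rw [ih _ _ _ (by simp at h ⊢; omega)]
        rw [show mySplitC (c :: rest) cur = mySplitC rest (c :: cur) by rw [mySplitC]; simp [hp]]

lemma splitOn_eq (l : List Char) : PySem.Chars.splitOn l sqrtCs = mySplitC l [] := by
  have := go_eq (l.length + 1) l [] [] (by omega)
  simpa [PySem.Chars.splitOn] using this

-- mySplitC with an accumulator, in terms of the empty-accumulator run
lemma mySplitC_cur : ∀ (n : Nat) (l : List Char), l.length ≤ n → ∀ cur,
    mySplitC l cur = (cur.reverse ++ (mySplitC l []).headD []) :: (mySplitC l []).tail := by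
  intro n
  induction n with
  | zero =>
    intro l h cur
    cases l with
    | nil => simp [mySplitC]
    | cons c rest => simp at h
  | succ n ih =>
    intro l h cur
    cases l with
    | nil => simp [mySplitC]
    | cons c rest =>
      by_cases hp : sqrtCs.isPrefixOf (c :: rest)
      · rw [mySplitC, mySplitC]; simp [hp]
      · rw [show mySplitC (c :: rest) cur = mySplitC rest (c :: cur) by rw [mySplitC]; simp [hp]]
        rw [show mySplitC (c :: rest) [] = mySplitC rest [c] by rw [mySplitC]; simp [hp]]
        rw [ih rest (by simp at h; omega) (c :: cur), ih rest (by simp at h; omega) [c]]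
        simp

-- the glue of a split list, as A's loop produces it
def glueA (L : List (List Char)) : List Char :=
  L.headD [] ++ ((L.tail).map pieceA).flatten

-- the main bridge: B's scan equals A's glue of the split chunks
lemma scan_eq_glue (l : List Char) : scanB l = glueA (mySplitC l []) := by
  induction l using scanB.induct with
  | case1 => simp [scanB, mySplitC, glueA]
  | case2 c rest hp hdrop =>
    rw [scanB]; simp only [hp, if_true]
    rw [show mySplitC (c :: rest) [] = [] :: mySplitC ((c :: rest).drop sqrtCs.length) [] by
          rw [mySplitC]; simp [hp]]
    have h5 : (c :: rest).drop sqrtCs.length = rest.drop 4 := by simp [sqrtCs]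
    rw [h5, hdrop]
    simp [mySplitC, glueA, pieceA]
  | case3 c rest hp d r' hdrop hcond ih =>
    rw [scanB]; simp only [hp, if_true, hdrop]
    rw [show mySplitC (c :: rest) [] = [] :: mySplitC ((c :: rest).drop sqrtCs.length) [] by
          rw [mySplitC]; simp [hp]]
    have h5 : (c :: rest).drop sqrtCs.length = rest.drop 4 := by simp [sqrtCs]
    rw [h5, hdrop]
    by_cases hp2 : sqrtCs.isPrefixOf (d :: r')
    · rw [show mySplitC (d :: r') [] = [] :: mySplitC ((d :: r').drop sqrtCs.length) [] by
            rw [mySplitC]; simp [hp2]] at ih ⊢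
      have hpre2 : sqrtCs <+: d :: r' := List.isPrefixOf_iff_prefix.mp hp2
      simp [glueA, pieceA, hpre2] at ih ⊢
      rw [ih]
    · have hd : d = '{' := by
        rcases hcond with h | h
        · exact h
        · exact absurd h hp2
      rw [show mySplitC (d :: r') [] = mySplitC r' [d] by rw [mySplitC]; simp [hp2]] at ih ⊢
      rw [mySplitC_cur r'.length r' le_rfl [d]] at ih ⊢
      simp [glueA, pieceA, hd] at ih ⊢
      rw [ih]
  | case4 c rest hp d r' hdrop hcond ih =>
    rw [scanB]; simp only [hp, if_true, hdrop]
    rw [show mySplitC (c :: rest) [] = [] :: mySplitC ((c :: rest).drop sqrtCs.length) [] by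
          rw [mySplitC]; simp [hp]]
    have h5 : (c :: rest).drop sqrtCs.length = rest.drop 4 := by simp [sqrtCs]
    rw [h5, hdrop]
    have hp2 : ¬ sqrtCs.isPrefixOf (d :: r') := by
      intro h; exact hcond (Or.inr h)
    have hd : d ≠ '{' := fun h => hcond (Or.inl h)
    have hpre2 : ¬ sqrtCs <+: d :: r' := fun h => hp2 (List.isPrefixOf_iff_prefix.mpr h)
    rw [show mySplitC (d :: r') [] = mySplitC r' [d] by rw [mySplitC]; simp [hp2]]
    rw [mySplitC_cur r'.length r' le_rfl [d]]
    simp [glueA, pieceA, hd, hpre2] at ih ⊢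
    rw [ih]
  | case5 c rest hp ih =>
    rw [scanB]; simp only [hp, if_false]
    rw [show mySplitC (c :: rest) [] = mySplitC rest [c] by rw [mySplitC]; simp [hp]]
    rw [mySplitC_cur rest.length rest le_rfl [c]]
    simp [glueA] at ih ⊢
    rw [ih]

lemma scan_no_sqrt (l : List Char) (h : ¬ sqrtCs <:+: l) : scanB l = l := by
  induction l with
  | nil => simp [scanB]
  | cons c rest ih =>
    have hp : ¬ sqrtCs.isPrefixOf (c :: rest) := by
      intro hpp
      exact h (List.IsPrefix.isInfix (List.isPrefixOf_iff_prefix.mp hpp))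
    rw [scanB]
    rw [ih (fun hi => h (hi.trans (List.suffix_cons c rest).isInfix))]
    simp [hp]

lemma foldl_append_pieceA (L : List (List Char)) : ∀ (init : List Char),
    L.foldl fixA_step init = init ++ (L.map pieceA).flatten := by
  induction L with
  | nil => intro init; simp
  | cons x t ih => intro init; rw [List.foldl_cons, fixA_step_eq, ih]; simp

-- ===== VERDICT (by name: the statement is the Claim_ definition above) =====
theorem fix_sqrt_spec : Claim_equal_fix_sqrt := by
  intro s _
  unfold Spec_fix_sqrt fix_sqrt fix_sqrt_alt
  by_cases hin : PySem.Str.isIn "\\sqrt" s = false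
  · simp only [hin, if_true]
    have hni : ¬ sqrtCs <:+: s.toList := by
      have h2 := hin
      simp at h2
      exact (PySem.Chars.isIn_eq_false_iff _ _).mp (by simpa [sqrtCs] using h2)
    rw [scan_no_sqrt _ hni, String.ofList_toList]
  · simp only [hin]
    rw [splitOn_eq, foldl_append_pieceA, scan_eq_glue]
    simp [glueA, List.drop_one]
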